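-- pv_equiv track=rewrite | github.com/mindcrackx/tablefootball | main2.py | calculate_side_balance_score
-- ===== SOURCE A (Python) =====
-- def calculate_side_balance_score(schedule) -> int:
--     """Calculate side balance score - how evenly teams are distributed across table sides"""
--     if len(schedule) == 0:
--         return 0
--
--     side_1_count = {}
--     side_2_count = {}
--
--     # Initialize all possible teams
--     all_teams = set()
--     for encounter in schedule:
--         _, t1_def, t1_att, t2_def, t2_att, _ = encounter
--         team1 = t1_def + t1_att
--         team2 = t2_def + t2_att
--         all_teams.add(team1)
--         all_teams.add(team2)
--
--     for team in all_teams: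
--         side_1_count[team] = 0
--         side_2_count[team] = 0
--
--     # Count side appearances
--     for encounter in schedule:
--         _, t1_def, t1_att, t2_def, t2_att, _ = encounter
--         team1 = t1_def + t1_att
--         team2 = t2_def + t2_att
--         side_1_count[team1] += 1
--         side_2_count[team2] += 1
--
--     # Calculate balance score
--     total_score = 0
--     for team in all_teams:
--         side1_plays = side_1_count[team]
--         side2_plays = side_2_count[team]
--         total_plays = side1_plays + side2_plays
--
--         if total_plays > 0:
--             balance_diff = abs(side1_plays - side2_plays)
--             balance_score = max(0, total_plays - balance_diff)
--             total_score += balance_score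
--
--     return total_score
-- ===== SOURCE B (Python) =====
-- def calculate_side_balance_score(schedule) -> int:
--     """Online pairing: one pass, one dict of net (side1 - side2) appearances per team.
--
--     Each side-1 appearance that finds a pending unmatched side-2 appearance of the
--     same team (net < 0) forms a balanced pair worth 2 points, and vice versa; the
--     number of pairs formed this way is exactly min(side1, side2) per team, so the
--     running score needs no counting dicts and no final reduction pass."""
--     score = 0
--     net = {}
--     for _, t1_def, t1_att, t2_def, t2_att, _ in schedule:
--         team1 = t1_def + t1_att
--         team2 = t2_def + t2_att
--         b1 = net.get(team1, 0)
--         if b1 < 0: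
--             score += 2
--         net[team1] = b1 + 1
--         b2 = net.get(team2, 0)
--         if b2 > 0:
--             score += 2
--         net[team2] = b2 - 1
--     return score
-- ===== Notes on version B (the rewrite author's own statement) =====
-- stated objective: alternative
-- what changed: B replaces A's count-then-reduce design (build per-team side counters, then a reduction pass computing total_plays - abs(diff) per team) by an online pairing algorithm: a single pass keeps one dict of each team's net (side1 minus side2) appearances and adds 2 to a running score whenever an appearance is matched by a pending appearance on the opposite side, so no counters survive the loop and no reduction pass exists.
import Mathlib
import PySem

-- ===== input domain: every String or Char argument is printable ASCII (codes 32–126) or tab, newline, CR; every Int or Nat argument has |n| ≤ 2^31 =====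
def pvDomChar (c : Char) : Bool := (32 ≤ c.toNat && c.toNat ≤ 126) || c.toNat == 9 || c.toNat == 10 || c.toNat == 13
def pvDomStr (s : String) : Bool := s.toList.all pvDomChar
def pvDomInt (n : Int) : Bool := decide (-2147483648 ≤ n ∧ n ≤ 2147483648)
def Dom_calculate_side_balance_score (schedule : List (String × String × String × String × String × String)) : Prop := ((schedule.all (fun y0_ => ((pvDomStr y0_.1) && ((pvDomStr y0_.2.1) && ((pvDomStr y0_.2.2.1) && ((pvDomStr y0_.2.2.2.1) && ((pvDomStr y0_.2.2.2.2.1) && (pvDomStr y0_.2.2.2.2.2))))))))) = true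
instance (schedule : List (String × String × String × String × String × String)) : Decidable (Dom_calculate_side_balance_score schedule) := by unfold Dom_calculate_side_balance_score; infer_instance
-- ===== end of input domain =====

-- B replaces A's count-then-reduce passes by a single online-pairing pass with one net-balance
-- dict and a running score (objective: alternative); return values proved equal on all inputs.


-- ===== PORT A =====
-- literal port of A: team strings are t1_def + t1_att / t2_def + t2_att (String ++);
-- the '+= 1' on an always-initialized key is ported as Dict.modify with default 0
-- (the zero-init loop guarantees every encountered team is a key, so no KeyError arises).
def calculate_side_balance_score (schedule : List (String × String × String × String × String × String)) : Int :=
  if PySem.List.len schedule = 0 then 0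
  else
    let all_teams : PySem.Set String := schedule.foldl (fun s e =>
      PySem.Set.add (PySem.Set.add s (e.2.1 ++ e.2.2.1)) (e.2.2.2.1 ++ e.2.2.2.2.1)) PySem.Set.empty
    let side_1_init : PySem.Dict String Int := all_teams.foldl (fun d t => d.insert t 0) PySem.Dict.empty
    let side_2_init : PySem.Dict String Int := all_teams.foldl (fun d t => d.insert t 0) PySem.Dict.empty
    let counts := schedule.foldl (fun (p : PySem.Dict String Int × PySem.Dict String Int) e =>
      (p.1.modify (e.2.1 ++ e.2.2.1) 0 (· + 1), p.2.modify (e.2.2.2.1 ++ e.2.2.2.2.1) 0 (· + 1)))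
      (side_1_init, side_2_init)
    all_teams.foldl (fun total_score team =>
      let side1_plays := counts.1.getD team 0
      let side2_plays := counts.2.getD team 0
      let total_plays := side1_plays + side2_plays
      if total_plays > 0 then total_score + max 0 (total_plays - |side1_plays - side2_plays|)
      else total_score) 0

-- ===== PORT B =====
-- literal port of Source B: one pass with a running score and one dict 'net' of each team's
-- side1-minus-side2 balance; each appearance matched by a pending opposite-side appearance
-- (net < 0 for side 1, net > 0 for side 2) adds 2 to the score.
def calculate_side_balance_score_alt (schedule : List (String × String × String × String × String × String)) : Int :=
  (schedule.foldl (fun (s : Int × PySem.Dict String Int) e =>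
      let team1 := e.2.1 ++ e.2.2.1
      let team2 := e.2.2.2.1 ++ e.2.2.2.2.1
      let b1 := s.2.getD team1 0
      let score1 := if b1 < 0 then s.1 + 2 else s.1
      let net1 := s.2.insert team1 (b1 + 1)
      let b2 := net1.getD team2 0
      let score2 := if b2 > 0 then score1 + 2 else score1
      (score2, net1.insert team2 (b2 - 1)))
    (0, PySem.Dict.empty)).1

-- ===== PRECONDITION & SPEC =====
def Spec_calculate_side_balance_score (schedule : List (String × String × String × String × String × String)) (out : Int) : Prop := out = calculate_side_balance_score_alt schedule
instance (schedule : List (String × String × String × String × String × String)) (out : Int) : Decidable (Spec_calculate_side_balance_score schedule out) := by unfold Spec_calculate_side_balance_score; infer_instance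

-- ===== CLAIM (what is proved, stated in full; the proofs are below) =====
def Claim_equal_calculate_side_balance_score : Prop := ∀ (schedule : List (String × String × String × String × String × String)), Dom_calculate_side_balance_score schedule → Spec_calculate_side_balance_score schedule (calculate_side_balance_score schedule)

-- ===== LEMMAS AND PROOFS =====

-- team-name projections of an encounter (reducible so rewrites match the ports' inline form)
abbrev pvT1 (e : String × String × String × String × String × String) : String := e.2.1 ++ e.2.2.1
abbrev pvT2 (e : String × String × String × String × String × String) : String := e.2.2.2.1 ++ e.2.2.2.2.1

-- the common per-team summand
def pvH (schedule : List (String × String × String × String × String × String)) (t : String) : Int :=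
  2 * min (((schedule.map pvT1).count t : Int)) (((schedule.map pvT2).count t : Int))

-- proof-side names for A's intermediate values (zeta-expansions of A's lets)
def pvAllTeams (schedule : List (String × String × String × String × String × String)) : PySem.Set String :=
  schedule.foldl (fun s e => PySem.Set.add (PySem.Set.add s (pvT1 e)) (pvT2 e)) PySem.Set.empty

def pvInit (schedule : List (String × String × String × String × String × String)) : PySem.Dict String Int :=
  (pvAllTeams schedule).foldl (fun d t => d.insert t 0) PySem.Dict.empty

def pvCounts (schedule : List (String × String × String × String × String × String)) :
    PySem.Dict String Int × PySem.Dict String Int :=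
  schedule.foldl (fun p e => (p.1.modify (pvT1 e) 0 (· + 1), p.2.modify (pvT2 e) 0 (· + 1)))
    (pvInit schedule, pvInit schedule)

-- A's all_teams loop: nodup, and members are exactly the team1/team2 names of the schedule
lemma pvAllTeams_nodup_aux (schedule : List (String × String × String × String × String × String))
    (s : PySem.Set String) (hs : s.Nodup) :
    (schedule.foldl (fun s e => PySem.Set.add (PySem.Set.add s (pvT1 e)) (pvT2 e)) s).Nodup := by
  induction schedule generalizing s with
  | nil => exact hs
  | cons e rest ih => exact ih _ (PySem.Set.nodup_add _ _ (PySem.Set.nodup_add _ _ hs))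

lemma pvAllTeams_mem_aux (schedule : List (String × String × String × String × String × String))
    (s : PySem.Set String) (y : String) :
    y ∈ schedule.foldl (fun s e => PySem.Set.add (PySem.Set.add s (pvT1 e)) (pvT2 e)) s ↔
      y ∈ s ∨ y ∈ schedule.map pvT1 ∨ y ∈ schedule.map pvT2 := by
  induction schedule generalizing s with
  | nil => simp
  | cons e rest ih =>
    simp only [List.foldl_cons, ih, PySem.Set.mem_add, List.map_cons, List.mem_cons]
    tauto

lemma pvAllTeams_nodup (schedule : List (String × String × String × String × String × String)) :
    (pvAllTeams schedule).Nodup :=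
  pvAllTeams_nodup_aux schedule _ List.nodup_nil

lemma pvAllTeams_mem (schedule : List (String × String × String × String × String × String)) (y : String) :
    y ∈ pvAllTeams schedule ↔ y ∈ schedule.map pvT1 ∨ y ∈ schedule.map pvT2 := by
  rw [pvAllTeams, pvAllTeams_mem_aux]
  simp [PySem.Set.empty]

-- A's zero-init dict looks up to 0 at every key
lemma pvInitZero (l : List String) (d : PySem.Dict String Int) (h : ∀ t, d.getD t 0 = 0) (t : String) :
    (l.foldl (fun d t => d.insert t 0) d).getD t 0 = 0 := by
  induction l generalizing d with
  | nil => exact h t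
  | cons x xs ih =>
    refine ih _ (fun u => ?_)
    rw [PySem.Dict.getD_insert]
    split <;> simp [h]

lemma pvInit_getD (schedule : List (String × String × String × String × String × String)) (t : String) :
    (pvInit schedule).getD t 0 = 0 :=
  pvInitZero _ PySem.Dict.empty (fun _ => by simp) t

-- A's count dicts look up to the side-1 / side-2 play counts
lemma pvCounts_getD (schedule : List (String × String × String × String × String × String)) (t : String) :
    (pvCounts schedule).1.getD t 0 = ((schedule.map pvT1).count t : Int)
    ∧ (pvCounts schedule).2.getD t 0 = ((schedule.map pvT2).count t : Int) := by
  have hsplit := PySem.List.foldl_prod_mk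
      (fun (d : PySem.Dict String Int) (e : String × String × String × String × String × String) =>
        d.modify (pvT1 e) 0 (· + 1))
      (fun (d : PySem.Dict String Int) (e : String × String × String × String × String × String) =>
        d.modify (pvT2 e) 0 (· + 1)) schedule (pvInit schedule) (pvInit schedule)
  have hm1 := @List.foldl_map _ _ _ pvT1
      (fun (d : PySem.Dict String Int) x => d.modify x 0 (· + 1)) schedule (pvInit schedule)
  have hm2 := @List.foldl_map _ _ _ pvT2
      (fun (d : PySem.Dict String Int) x => d.modify x 0 (· + 1)) schedule (pvInit schedule)
  rw [pvCounts, hsplit, ← hm1, ← hm2]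
  rw [PySem.Dict.getD_foldl_modify_add_one, PySem.Dict.getD_foldl_modify_add_one, pvInit_getD]
  simp

-- an accumulate-if loop is the sum of an if-map
lemma pvFoldlIf (l : List String) (c : String → Prop) [DecidablePred c] (v : String → Int) (a : Int) :
    l.foldl (fun acc t => if c t then acc + v t else acc) a
      = a + (l.map (fun t => if c t then v t else 0)).sum := by
  induction l generalizing a with
  | nil => simp
  | cons x xs ih =>
    simp only [List.foldl_cons, List.map_cons, List.sum_cons, ih]
    split <;> ring

-- the per-team closed form: A's max 0 (total - |diff|) is 2 * min (counts are Nat casts)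
lemma pvClosedForm (a b : Nat) (h : 0 < a + b) :
    (if ((a : Int) + b > 0) then max 0 ((a : Int) + b - |(a : Int) - b|) else 0)
      = 2 * min (a : Int) (b : Int) := by
  rw [if_pos (by exact_mod_cast h)]
  rcases le_total (a : Int) b with hab | hab
  · rw [min_eq_left hab, abs_of_nonpos (by omega), max_eq_right (by omega)]; ring
  · rw [min_eq_right hab, abs_of_nonneg (by omega), max_eq_right (by omega)]; ring

-- A's final loop computes the Finset sum of pvH over the full team set
lemma pvA_eq (schedule : List (String × String × String × String × String × String)) :
    ((pvAllTeams schedule).foldl (fun total_score team =>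
        if (pvCounts schedule).1.getD team 0 + (pvCounts schedule).2.getD team 0 > 0 then
          total_score + max 0 ((pvCounts schedule).1.getD team 0 + (pvCounts schedule).2.getD team 0
            - |(pvCounts schedule).1.getD team 0 - (pvCounts schedule).2.getD team 0|)
        else total_score) 0)
      = ∑ t ∈ (pvAllTeams schedule : List String).toFinset, pvH schedule t := by
  rw [pvFoldlIf, zero_add, ← List.sum_toFinset _ (pvAllTeams_nodup schedule)]
  refine Finset.sum_congr rfl (fun t ht => ?_)
  rw [List.mem_toFinset] at ht
  rw [(pvCounts_getD schedule t).1, (pvCounts_getD schedule t).2]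
  have hpos : 0 < (schedule.map pvT1).count t + (schedule.map pvT2).count t := by
    rcases (pvAllTeams_mem schedule t).1 ht with h | h
    · have := List.count_pos_iff.2 h; omega
    · have : 0 < (schedule.map pvT2).count t := List.count_pos_iff.2 h; omega
  rw [pvH]
  exact_mod_cast pvClosedForm _ _ hpos

-- ===== B-side machinery: the event stream and the online-pairing invariant =====

-- one event per table side of each encounter (true = side 1, false = side 2)
def pvEvents (schedule : List (String × String × String × String × String × String)) :
    List (String × Bool) :=
  schedule.flatMap (fun e => [(pvT1 e, true), (pvT2 e, false)])

-- B's per-event transition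
def pvStep (s : Int × PySem.Dict String Int) (ev : String × Bool) : Int × PySem.Dict String Int :=
  let b := s.2.getD ev.1 0
  if ev.2 then (if b < 0 then s.1 + 2 else s.1, s.2.insert ev.1 (b + 1))
  else (if b > 0 then s.1 + 2 else s.1, s.2.insert ev.1 (b - 1))

-- per-team score contribution after an event prefix
def pvF (ev : List (String × Bool)) (t : String) : Int :=
  2 * min ((ev.count (t, true) : Int)) ((ev.count (t, false) : Int))

-- B's per-encounter body is two pvStep transitions, so B's fold is a fold over the events
lemma pvB_fold (schedule : List (String × String × String × String × String × String))
    (s : Int × PySem.Dict String Int) :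
    schedule.foldl (fun s e =>
      let team1 := pvT1 e
      let team2 := pvT2 e
      let b1 := s.2.getD team1 0
      let score1 := if b1 < 0 then s.1 + 2 else s.1
      let net1 := s.2.insert team1 (b1 + 1)
      let b2 := net1.getD team2 0
      let score2 := if b2 > 0 then score1 + 2 else score1
      (score2, net1.insert team2 (b2 - 1))) s
    = (pvEvents schedule).foldl pvStep s := by
  induction schedule generalizing s with
  | nil => rfl
  | cons e rest ih =>
    simp only [List.foldl_cons, pvEvents, List.flatMap_cons, List.foldl_append] at *
    rw [ih]
    rfl

-- a finset sum under a one-point update of the summand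
lemma pvSumStep (F : Finset String) (g g' : String → Int) (u : String)
    (hoff : ∀ t ∈ F.erase u, g' t = g t) (hz : u ∉ F → g u = 0) :
    ∑ t ∈ insert u F, g' t = (∑ t ∈ F, g t) + (g' u - g u) := by
  rw [← Finset.add_sum_erase _ g' (Finset.mem_insert_self u F), Finset.erase_insert_eq_erase,
    Finset.sum_congr rfl hoff]
  by_cases hu : u ∈ F
  · rw [← Finset.add_sum_erase _ g hu]; ring
  · rw [Finset.erase_eq_of_notMem hu, hz hu]; ring

-- counting events after appending one event
lemma pvCount_append (ev : List (String × Bool)) (u t : String) (s b : Bool) :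
    ((ev ++ [(u, s)]).count (t, b) : Int)
      = (ev.count (t, b) : Int) + (if t = u ∧ b = s then 1 else 0) := by
  by_cases ht : t = u
  · by_cases hb : b = s
    · subst ht; subst hb; simp [List.count_append]
    · subst ht
      simp [List.count_append, List.count_cons, hb]
      exact fun h => hb h.symm
  · simp [List.count_append, List.count_cons, ht]
    exact fun h => absurd h.symm ht

-- the online-pairing invariant: after any event prefix, the dict holds each team's net
-- balance and the accumulator holds the full balance score of the prefix
lemma pvInv (ev : List (String × Bool)) :
    (∀ t, (ev.foldl pvStep (0, PySem.Dict.empty)).2.getD t 0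
        = (ev.count (t, true) : Int) - (ev.count (t, false) : Int))
    ∧ (ev.foldl pvStep (0, PySem.Dict.empty)).1
        = ∑ t ∈ (ev.map Prod.fst).toFinset, pvF ev t := by
  induction ev using List.reverseRecOn with
  | nil => simp [pvF]
  | append_singleton ev e ih =>
    obtain ⟨u, side⟩ := e
    obtain ⟨ihd, ihs⟩ := ih
    rw [List.foldl_append] at *
    set r := ev.foldl pvStep (0, PySem.Dict.empty) with hr
    have hF : ((ev ++ [(u, side)]).map Prod.fst).toFinset
        = insert u (ev.map Prod.fst).toFinset := by
      simp [List.map_append, Finset.union_singleton]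
    have hz : u ∉ (ev.map Prod.fst).toFinset → pvF ev u = 0 := by
      intro hu
      have h1 : ev.count (u, true) = 0 := by
        rw [List.count_eq_zero]
        intro hmem
        exact hu (List.mem_toFinset.2 (List.mem_map.2 ⟨_, hmem, rfl⟩))
      unfold pvF
      rw [h1]
      omega
    have hoff : ∀ t ∈ (ev.map Prod.fst).toFinset.erase u,
        pvF (ev ++ [(u, side)]) t = pvF ev t := by
      intro t ht
      have hne : t ≠ u := Finset.ne_of_mem_erase ht
      simp only [pvF]
      rw [pvCount_append, pvCount_append]
      simp [hne]
    constructor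
    · intro t
      cases side
      · -- side 2 event: net decremented
        have hstep2 : (List.foldl pvStep r [(u, false)]).2
            = r.2.insert u (r.2.getD u 0 - 1) := rfl
        rw [hstep2, PySem.Dict.getD_insert]
        by_cases hte : t = u
        · subst hte
          rw [if_pos rfl, ihd, pvCount_append, pvCount_append]
          simp
          ring
        · rw [if_neg hte, ihd, pvCount_append, pvCount_append]
          simp [hte]
      · -- side 1 event: net incremented
        have hstep2 : (List.foldl pvStep r [(u, true)]).2
            = r.2.insert u (r.2.getD u 0 + 1) := rfl
        rw [hstep2, PySem.Dict.getD_insert]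
        by_cases hte : t = u
        · subst hte
          rw [if_pos rfl, ihd, pvCount_append, pvCount_append]
          simp
          ring
        · rw [if_neg hte, ihd, pvCount_append, pvCount_append]
          simp [hte]
    · have hd := ihd u
      cases side
      · -- side 2 event: pair formed iff net > 0 (side-1 surplus pending)
        have hstep1 : (List.foldl pvStep r [(u, false)]).1
            = if r.2.getD u 0 > 0 then r.1 + 2 else r.1 := rfl
        rw [hstep1, hF, pvSumStep _ (pvF ev) (pvF (ev ++ [(u, false)])) u hoff hz, ← ihs]
        have hcu : ((ev ++ [(u, false)]).count (u, false) : Int) = ev.count (u, false) + 1 := by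
          rw [pvCount_append]; simp
        have hcu' : ((ev ++ [(u, false)]).count (u, true) : Int) = ev.count (u, true) := by
          rw [pvCount_append]; simp
        simp only [pvF, hcu, hcu', hd]
        split <;> omega
      · -- side 1 event: pair formed iff net < 0 (side-2 surplus pending)
        have hstep1 : (List.foldl pvStep r [(u, true)]).1
            = if r.2.getD u 0 < 0 then r.1 + 2 else r.1 := rfl
        rw [hstep1, hF, pvSumStep _ (pvF ev) (pvF (ev ++ [(u, true)])) u hoff hz, ← ihs]
        have hcu : ((ev ++ [(u, true)]).count (u, true) : Int) = ev.count (u, true) + 1 := by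
          rw [pvCount_append]; simp
        have hcu' : ((ev ++ [(u, true)]).count (u, false) : Int) = ev.count (u, false) := by
          rw [pvCount_append]; simp
        simp only [pvF, hcu, hcu', hd]
        split <;> omega

-- event counts are the side-1 / side-2 play counts of the schedule
lemma pvCount_events (schedule : List (String × String × String × String × String × String))
    (t : String) :
    (pvEvents schedule).count (t, true) = (schedule.map pvT1).count t
    ∧ (pvEvents schedule).count (t, false) = (schedule.map pvT2).count t := by
  induction schedule with
  | nil => simp [pvEvents]
  | cons e rest ih =>
    obtain ⟨ih1, ih2⟩ := ih
    constructor
    · show ((pvT1 e, true) :: (pvT2 e, false) :: pvEvents rest).count (t, true)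
        = ((pvT1 e) :: rest.map pvT1).count t
      simp [List.count_cons, ih1]
    · show ((pvT1 e, true) :: (pvT2 e, false) :: pvEvents rest).count (t, false)
        = ((pvT2 e) :: rest.map pvT2).count t
      simp [List.count_cons, ih2]

-- the event teams are exactly the schedule's teams
lemma pvEvents_teams (schedule : List (String × String × String × String × String × String))
    (t : String) :
    t ∈ (pvEvents schedule).map Prod.fst ↔ t ∈ schedule.map pvT1 ∨ t ∈ schedule.map pvT2 := by
  induction schedule with
  | nil => simp [pvEvents]
  | cons e rest ih =>
    simp only [pvEvents, List.flatMap_cons, List.map_append, List.mem_append, List.map_cons,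
      List.mem_cons] at *
    tauto

-- B computes the Finset sum of pvH over the full team set
lemma pvB_eq (schedule : List (String × String × String × String × String × String)) :
    calculate_side_balance_score_alt schedule
      = ∑ t ∈ (pvAllTeams schedule : List String).toFinset, pvH schedule t := by
  rw [calculate_side_balance_score_alt, pvB_fold, (pvInv (pvEvents schedule)).2]
  refine Finset.sum_congr (Finset.ext fun t => ?_) (fun t _ => ?_)
  · rw [List.mem_toFinset, List.mem_toFinset, pvEvents_teams, pvAllTeams_mem]
  · rw [pvF, pvH, (pvCount_events schedule t).1, (pvCount_events schedule t).2]

-- ===== VERDICT (by name: the statement is the Claim_ definition above) =====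
theorem calculate_side_balance_score_spec : Claim_equal_calculate_side_balance_score := by
  intro schedule _
  show calculate_side_balance_score schedule = calculate_side_balance_score_alt schedule
  rw [pvB_eq]
  rcases eq_or_ne schedule [] with rfl | hne
  · rfl
  · unfold calculate_side_balance_score
    rw [if_neg (by simp [PySem.List.len_eq, hne])]
    exact pvA_eq schedule
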